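-- pv_equiv track=rewrite | github.com/IngMichalaM/AdventOfCode | 2024/day16/day16a.py | path_with_color
-- ===== SOURCE A (Python) =====
-- def path_with_color(maze, path):
--     # ANSI escape codes for colors
--     COLOR_X = '\033[92m'  # Green
--     COLOR_RESET = '\033[0m'  # Reset to default
--
--     # Create a new representation of the maze with colors
--     colored_path = []
--
--     for i in range(len(maze)):
--         colored_row = []
--         for j in range(len(maze[0])):
--             if (i, j) in path:
--                 colored_row.append(f"{COLOR_X}x{COLOR_RESET}")  # Add colored 'x'
--             else:
--                 colored_row.append(maze[i][j])  # Keep walls and unvisited cells unchanged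
--         colored_path.append(colored_row)
--
--     return colored_path
-- ===== SOURCE B (Python) =====
-- def path_with_color(maze, path):
--     COLOR_X = '\033[92m'  # Green
--     COLOR_RESET = '\033[0m'
--     w = len(maze[0]) if maze else 0
--     # copy the maze cell by cell (same column range as A: len(maze[0]) for every row)
--     colored_path = [[row[j] for j in range(w)] for row in maze]
--     # scatter the colored marks over the path coordinates that lie inside the grid
--     mark = f"{COLOR_X}x{COLOR_RESET}"
--     for (i, j) in path:
--         if 0 <= i < len(maze) and 0 <= j < w:
--             colored_path[i][j] = mark
--     return colored_path
-- ===== Notes on version B (the rewrite author's own statement) =====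
-- stated objective: alternative
-- what changed: B copies the maze once and then scatter-writes the green mark at in-grid path coordinates, instead of testing (i,j) in path for every cell of the grid.
-- outside the precondition, e.g. on path_with_color(['ab', 'c'], {(1, 1)}): A returns [['a', 'b'], ['c', '\x1b[92mx\x1b[0m']], B raises IndexError
import Mathlib
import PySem

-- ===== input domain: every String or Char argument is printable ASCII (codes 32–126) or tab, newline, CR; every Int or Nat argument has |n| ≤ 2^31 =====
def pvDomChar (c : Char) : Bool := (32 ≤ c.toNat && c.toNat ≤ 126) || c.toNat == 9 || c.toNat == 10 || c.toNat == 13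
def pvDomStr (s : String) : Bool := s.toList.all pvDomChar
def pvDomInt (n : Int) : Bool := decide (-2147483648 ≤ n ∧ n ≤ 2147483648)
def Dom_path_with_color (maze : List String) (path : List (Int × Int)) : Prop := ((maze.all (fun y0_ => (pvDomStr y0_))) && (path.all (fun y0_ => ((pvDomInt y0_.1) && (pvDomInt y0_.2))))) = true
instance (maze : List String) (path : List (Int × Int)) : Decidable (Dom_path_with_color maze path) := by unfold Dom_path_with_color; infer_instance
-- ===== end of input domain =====

-- B copies the maze once and scatter-writes the mark at in-grid path coordinates, replacing A's per-cell membership test (alternative decomposition; not measured faster).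
-- ===== PORT A =====
def pvGreen : String := "\x1B[92mx\x1B[0m"

-- literal transliteration of A: for each row index i, for each j in range(len(maze[0])),
-- color if (i,j) in path else keep maze[i][j] (in range under Pre_, so getD defaults are never hit).
def path_with_color (maze : List String) (path : List (Int × Int)) : List (List String) :=
  (List.range maze.length).map (fun (i : Nat) =>
    (List.range (maze.headD "").toList.length).map (fun (j : Nat) =>
      if ((i : Int), (j : Int)) ∈ path then pvGreen
      else String.ofList [(maze.getD i "").toList.getD j ' ']))

-- ===== PORT B =====
-- one scatter step of Source B's loop: write the mark at (i,j) if it lies inside the grid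
def pvStep (mlen w : Nat) (g : List (List String)) (p : Int × Int) : List (List String) :=
  if 0 ≤ p.1 ∧ p.1 < (mlen : Int) ∧ 0 ≤ p.2 ∧ p.2 < (w : Int) then
    g.set p.1.toNat ((g.getD p.1.toNat []).set p.2.toNat pvGreen)
  else g

def path_with_color_alt (maze : List String) (path : List (Int × Int)) : List (List String) :=
  let w := (maze.headD "").toList.length
  let grid := maze.map (fun row => (List.range w).map (fun j => String.ofList [row.toList.getD j ' ']))
  path.foldl (pvStep maze.length w) grid

-- ===== PRECONDITION & SPEC =====
-- Pre_ excludes ragged mazes (a row shorter than row 0): there A raises IndexError unless every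
-- missing cell happens to lie on the path, and B's copy phase raises IndexError.
def Pre_path_with_color (maze : List String) (path : List (Int × Int)) : Prop :=
  ∀ row ∈ maze, (maze.headD "").toList.length ≤ row.toList.length
instance (maze : List String) (path : List (Int × Int)) : Decidable (Pre_path_with_color maze path) := by unfold Pre_path_with_color; infer_instance
def pvWitness_path_with_color : List String × (List (Int × Int)) := (["#.#", "#x#"], [(1, 1)])
def Spec_path_with_color (maze : List String) (path : List (Int × Int)) (out : List (List String)) : Prop := out = path_with_color_alt maze path
instance (maze : List String) (path : List (Int × Int)) (out : List (List String)) : Decidable (Spec_path_with_color maze path out) := by unfold Spec_path_with_color; infer_instance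

-- ===== CLAIM (what is proved, stated in full; the proofs are below) =====
def Claim_equal_path_with_color : Prop := ∀ (maze : List String) (path : List (Int × Int)), Dom_path_with_color maze path → Pre_path_with_color maze path → Spec_path_with_color maze path (path_with_color maze path)

-- ===== LEMMAS AND PROOFS =====

-- getD of a set, fully case-analysed
theorem pvGetD_set {α : Type} (l : List α) (a i : Nat) (x d : α) :
    (l.set a x).getD i d = if a = i ∧ a < l.length then x else l.getD i d := by
  simp only [List.getD_eq_getElem?_getD, List.getElem?_set]
  by_cases h1 : a = i
  · subst h1
    by_cases h2 : a < l.length <;> simp [h2]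
  · simp [h1]

-- the scatter loop of B: shape is preserved and each in-grid cell ends up
-- green iff its coordinates occur in the remaining path
theorem pvScatter_spec (mlen w : Nat) (path : List (Int × Int)) :
    ∀ g : List (List String), g.length = mlen →
    (∀ i, i < mlen → (g.getD i []).length = w) →
    (path.foldl (pvStep mlen w) g).length = mlen ∧
    (∀ i, i < mlen → ((path.foldl (pvStep mlen w) g).getD i []).length = w) ∧
    (∀ i j, i < mlen → j < w →
      ((path.foldl (pvStep mlen w) g).getD i []).getD j "" =
        if ((i : Int), (j : Int)) ∈ path then pvGreen else (g.getD i []).getD j "") := by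
  induction path with
  | nil => intro g hg hrow; exact ⟨hg, hrow, fun i j _ _ => by simp⟩
  | cons p path ih =>
    obtain ⟨a, b⟩ := p
    intro g hg hrow
    have hg' : (pvStep mlen w g (a, b)).length = mlen := by
      unfold pvStep; split <;> simp [hg]
    have hrow' : ∀ i, i < mlen → ((pvStep mlen w g (a, b)).getD i []).length = w := by
      intro i hi
      unfold pvStep; split
      · rw [pvGetD_set]; split
        · next h => simp only [List.length_set]; exact hrow _ (by omega)
        · exact hrow i hi
      · exact hrow i hi
    have hcell' : ∀ i j, i < mlen → j < w →
        ((pvStep mlen w g (a, b)).getD i []).getD j "" =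
          if ((a, b) : Int × Int) = ((i : Int), (j : Int)) then pvGreen
          else (g.getD i []).getD j "" := by
      intro i j hi hj
      unfold pvStep
      by_cases hp : ((a, b) : Int × Int) = ((i : Int), (j : Int))
      · simp only [Prod.mk.injEq] at hp
        obtain ⟨rfl, rfl⟩ := hp
        rw [if_pos rfl]
        split
        · simp only [Int.toNat_natCast]
          rw [pvGetD_set, if_pos ⟨rfl, by omega⟩, pvGetD_set,
            if_pos ⟨rfl, by have := hrow i hi; omega⟩]
        · next hC => exact absurd (by simp only []; omega) hC
      · rw [if_neg hp]
        simp only [Prod.mk.injEq, not_and] at hp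
        split
        · next hC =>
          simp only [] at hC
          rw [pvGetD_set]
          by_cases ha : a.toNat = i ∧ a.toNat < g.length
          · rw [if_pos ha, pvGetD_set, if_neg, ha.1]
            rintro ⟨hb1, _⟩
            exact hp (by omega) (by omega)
          · rw [if_neg ha]
        · rfl
    obtain ⟨h1, h2, h3⟩ := ih (pvStep mlen w g (a, b)) hg' hrow'
    refine ⟨by simpa using h1, by simpa using h2, ?_⟩
    intro i j hi hj
    simp only [List.foldl_cons]
    rw [h3 i j hi hj, hcell' i j hi hj]
    by_cases hmem : ((i : Int), (j : Int)) ∈ path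
    · simp [hmem, List.mem_cons]
    · by_cases hp : ((a, b) : Int × Int) = ((i : Int), (j : Int))
      · simp [hmem, hp, List.mem_cons]
      · simp [hmem, List.mem_cons, hp, (show ¬ (((i : Int), (j : Int)) = ((a, b) : Int × Int)) from fun h => hp h.symm)]

-- the two ports agree on every input (the ports themselves are total)
theorem pvMain (maze : List String) (path : List (Int × Int)) :
    path_with_color maze path = path_with_color_alt maze path := by
  unfold path_with_color path_with_color_alt
  show _ = path.foldl (pvStep maze.length ((maze.headD "").toList.length))
      (maze.map (fun row => (List.range ((maze.headD "").toList.length)).map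
        (fun j => String.ofList [row.toList.getD j ' '])))
  set w := (maze.headD "").toList.length with hw
  set grid := maze.map (fun row => (List.range w).map (fun j => String.ofList [row.toList.getD j ' '])) with hgrid
  have hglen : grid.length = maze.length := by simp [hgrid]
  have hgrow : ∀ i, i < maze.length → (grid.getD i []).length = w := by
    intro i hi
    simp [hgrid, List.getD_eq_getElem?_getD, List.getElem?_map,
      (List.getElem?_eq_getElem (l := maze) hi)]
  have hgcell : ∀ i j, i < maze.length → j < w →
      (grid.getD i []).getD j "" = String.ofList [(maze.getD i "").toList.getD j ' '] := by
    intro i j hi hj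
    simp [hgrid, List.getD_eq_getElem?_getD, List.getElem?_map,
      (List.getElem?_eq_getElem (l := maze) hi), List.getElem?_range, hj]
  obtain ⟨h1, h2, h3⟩ := pvScatter_spec maze.length w path grid hglen hgrow
  apply List.ext_getElem (by simpa using h1.symm)
  intro i hiA hiB
  have hi : i < maze.length := by simpa using hiA
  apply List.ext_getElem
  · simp only [List.getElem_map, List.getElem_range, List.length_map, List.length_range]
    have := h2 i hi
    rw [List.getD_eq_getElem?_getD, List.getElem?_eq_getElem hiB] at this
    simpa using this.symm
  · intro j hjA hjB
    have hj : j < w := by simpa using hjA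
    have hcell := h3 i j hi hj
    rw [List.getD_eq_getElem?_getD, List.getD_eq_getElem?_getD,
      List.getElem?_eq_getElem hiB, Option.getD_some,
      List.getElem?_eq_getElem hjB, Option.getD_some] at hcell
    rw [hgcell i j hi hj] at hcell
    simp only [List.getElem_map, List.getElem_range]
    exact hcell.symm

-- ===== VERDICT (by name: the statement is the Claim_ definition above) =====
theorem path_with_color_spec : Claim_equal_path_with_color := by
  intro maze path _ _
  exact pvMain maze path
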